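-- pv_equiv track=rewrite | github.com/kpopow7/knowledge_extractor | rag_extractor/extract.py | _normalize_table_rows
-- ===== SOURCE A (Python) =====
-- def _normalize_table_rows(raw: list[list[str | None]] | None) -> list[list[str]]:
--     if not raw:
--         return []
--     rows: list[list[str]] = []
--     for row in raw:
--         cells = [(c or "").strip() if c is not None else "" for c in row]
--         rows.append(cells)
--     while rows and not any(c for c in rows[-1]):
--         rows.pop()
--     return rows
-- ===== SOURCE B (Python) =====
-- def _normalize_table_rows(raw):
--     if not raw:
--         return []
--     rows = []
--     last = -1
--     for i, row in enumerate(raw):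
--         cells = [(c or "").strip() if c is not None else "" for c in row]
--         rows.append(cells)
--         if any(cells):
--             last = i
--     return rows[:last + 1]
-- ===== Notes on version B (the rewrite author's own statement) =====
-- stated objective: alternative
-- what changed: Replaces A's two phases (normalize all rows, then destructively pop trailing empty rows with a while loop) by a single forward pass that records the index of the last non-empty row and returns rows[:last+1].
import Mathlib
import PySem

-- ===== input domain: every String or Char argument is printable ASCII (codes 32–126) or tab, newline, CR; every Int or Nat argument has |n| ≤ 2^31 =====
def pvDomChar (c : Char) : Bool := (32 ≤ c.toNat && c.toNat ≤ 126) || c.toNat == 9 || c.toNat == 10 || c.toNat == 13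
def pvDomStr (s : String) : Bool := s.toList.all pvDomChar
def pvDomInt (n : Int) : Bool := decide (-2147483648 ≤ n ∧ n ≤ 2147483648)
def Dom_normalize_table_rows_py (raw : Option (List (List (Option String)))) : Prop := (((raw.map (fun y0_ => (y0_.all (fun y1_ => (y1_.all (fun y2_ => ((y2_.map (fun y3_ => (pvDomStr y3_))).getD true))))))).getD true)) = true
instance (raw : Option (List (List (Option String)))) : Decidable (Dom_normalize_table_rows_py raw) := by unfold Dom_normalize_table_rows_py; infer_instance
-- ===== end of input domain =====

-- B differs from A only in structure: one fused forward pass + slice instead of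
-- normalize-then-pop; the equivalence below is exact on all inputs.

-- ===== PORT A =====
-- (c or "").strip() if c is not None else ""
def pvCellA (c : Option String) : String :=
  match c with
  | none => ""
  | some s => PySem.Str.strip (if s = "" then "" else s)

-- while rows and not any(c for c in rows[-1]): rows.pop()
def pvPopA (rows : List (List String)) : List (List String) :=
  if h : rows ≠ [] then
    if ¬ (rows.getLast h).any (fun c => decide (c ≠ "")) then
      pvPopA rows.dropLast
    else rows
  else rows
termination_by rows.length
decreasing_by
  have := List.length_pos_iff.mpr h
  simp [List.length_dropLast]; omega

def normalize_table_rows_py (raw : Option (List (List (Option String)))) : List (List String) :=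
  match raw with
  | none => []
  | some l =>
    if l = [] then []
    else
      let rows := l.foldl (fun rows row => rows ++ [row.map pvCellA]) []
      pvPopA rows

-- ===== PORT B =====
def pvCellB (c : Option String) : String :=
  match c with
  | none => ""
  | some s => PySem.Str.strip (if s = "" then "" else s)

def pvStepB (st : List (List String) × Int) (ir : Int × List (Option String)) :
    List (List String) × Int :=
  let cells := ir.2.map pvCellB
  let rows := st.1 ++ [cells]
  if cells.any (fun c => decide (c ≠ "")) then (rows, ir.1) else (rows, st.2)

def normalize_table_rows_py_alt (raw : Option (List (List (Option String)))) : List (List String) :=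
  match raw with
  | none => []
  | some l =>
    if l = [] then []
    else
      let st := (PySem.List.enumerate l 0).foldl pvStepB ([], -1)
      PySem.List.slice st.1 none (some (st.2 + 1))

-- ===== PRECONDITION & SPEC =====
def Spec_normalize_table_rows_py (raw : Option (List (List (Option String)))) (out : List (List String)) : Prop := out = normalize_table_rows_py_alt raw
instance (raw : Option (List (List (Option String)))) (out : List (List String)) : Decidable (Spec_normalize_table_rows_py raw out) := by unfold Spec_normalize_table_rows_py; infer_instance

-- ===== CLAIM (what is proved, stated in full; the proofs are below) =====
def Claim_equal_normalize_table_rows_py : Prop := ∀ (raw : Option (List (List (Option String)))), Dom_normalize_table_rows_py raw → Spec_normalize_table_rows_py raw (normalize_table_rows_py raw)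

-- ===== LEMMAS AND PROOFS =====

-- A's normalize loop builds the map
theorem foldA_eq_map (l : List (List (Option String))) (acc : List (List String)) :
    l.foldl (fun rows row => rows ++ [row.map pvCellA]) acc
      = acc ++ l.map (fun row => row.map pvCellA) := by
  induction l generalizing acc with
  | nil => simp [List.foldl]
  | cons r t ih => simp [List.foldl, ih]

-- one right-step of A's pop loop
theorem pvPopA_concat (rows : List (List String)) (r : List String) :
    pvPopA (rows ++ [r])
      = if r.any (fun c => decide (c ≠ "")) then rows ++ [r] else pvPopA rows := by
  rw [pvPopA]
  have hne : rows ++ [r] ≠ [] := by simp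
  rw [dif_pos hne]
  rw [List.getLast_concat, List.dropLast_concat]
  by_cases hr : (r.any fun c => decide (c ≠ "")) = true
  · rw [if_neg (by simpa using hr), if_pos hr]
  · rw [if_pos (by simpa using hr), if_neg hr]

-- one right-step of B's fold
theorem foldB_concat (l : List (List (Option String))) (row : List (Option String)) :
    (PySem.List.enumerate (l ++ [row]) 0).foldl pvStepB ([], -1)
      = pvStepB ((PySem.List.enumerate l 0).foldl pvStepB ([], -1)) ((l.length : Int), row) := by
  rw [PySem.List.enumerate_append]
  simp [PySem.List.enumerate_cons, PySem.List.enumerate_nil]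

-- pvStepB, spelled out (pvCellB = pvCellA definitionally)
theorem pvStepB_eq (st : List (List String) × Int) (i : Int) (row : List (Option String)) :
    pvStepB st (i, row)
      = if (row.map pvCellA).any (fun c => decide (c ≠ "")) then
          (st.1 ++ [row.map pvCellA], i)
        else (st.1 ++ [row.map pvCellA], st.2) := rfl

-- main invariant, by right induction
theorem main_inv (l : List (List (Option String))) :
    ((PySem.List.enumerate l 0).foldl pvStepB ([], -1)).1
        = l.map (fun row => row.map pvCellA)
    ∧ -1 ≤ ((PySem.List.enumerate l 0).foldl pvStepB ([], -1)).2
    ∧ ((PySem.List.enumerate l 0).foldl pvStepB ([], -1)).2 < (l.length : Int)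
    ∧ pvPopA (l.map (fun row => row.map pvCellA))
        = (l.map (fun row => row.map pvCellA)).take
            (((PySem.List.enumerate l 0).foldl pvStepB ([], -1)).2 + 1).toNat := by
  induction l using List.reverseRecOn with
  | nil =>
    refine ⟨rfl, by norm_num, by norm_num, ?_⟩
    rw [pvPopA]; simp
  | append_singleton t row ih =>
    obtain ⟨h1, h2, h3, h4⟩ := ih
    rw [foldB_concat, pvStepB_eq]
    have hlen : (t.map (fun row => row.map pvCellA)).length = t.length := by simp
    by_cases hany : ((row.map pvCellA).any fun c => decide (c ≠ "")) = true
    · rw [if_pos hany]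
      refine ⟨by simp [h1], by simp, by simp, ?_⟩
      rw [List.map_append, List.map_singleton, pvPopA_concat, if_pos hany]
      rw [show ((t.length : Int) + 1).toNat = t.length + 1 by omega]
      rw [List.take_append]
      simp [hlen]
    · rw [if_neg hany]
      refine ⟨by simp [h1], h2, by simp; omega, ?_⟩
      rw [List.map_append, List.map_singleton, pvPopA_concat, if_neg hany, h4]
      rw [List.take_append, hlen]
      rw [show (((PySem.List.enumerate t 0).foldl pvStepB ([], -1)).2 + 1).toNat - t.length = 0 by omega]
      simp

-- ===== VERDICT (by name: the statement is the Claim_ definition above) =====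
theorem normalize_table_rows_py_spec : Claim_equal_normalize_table_rows_py := by
  intro raw _
  unfold Spec_normalize_table_rows_py normalize_table_rows_py normalize_table_rows_py_alt
  match raw with
  | none => rfl
  | some l =>
    by_cases hl : l = []
    · simp [hl]
    · simp only [hl, ite_false]
      obtain ⟨h1, h2, _, h4⟩ := main_inv l
      rw [foldA_eq_map, List.nil_append, h1, h4,
        PySem.List.slice_to _ (by omega)]
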